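-- pv_equiv track=rewrite | github.com/TristanKatwaroo/python-exercises | sentimentAnalysis/sentiment_analysis.py | determineHappiness
-- ===== SOURCE A (Python) =====
-- def determineHappiness(tLine, keyDictionary, ALPHABET):
--     allowed = set(ALPHABET + ' ')               # Defines the allowed characters as letters of the alphabet and spaces
--     tweetList = tLine.split()                                                                  # Splits the tweet list
--     sentiment = 0                                                                        # Defines the sentiment value
--     for key in tweetList:
--         key = ''.join(l for l in str(key) if l in allowed)                     # Only read characters that are allowed
--         key = key.lower()                                                                 # Converts text to lowercase
--         if key in keyDictionary:
--             sentiment = sentiment + int(keyDictionary[key])                # Calculates the sentiment value of a tweet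
--     return sentiment                                                                     # Returns the sentiment value
-- ===== SOURCE B (Python) =====
-- def determineHappiness(tLine, keyDictionary, ALPHABET):
--     # Tally the cleaned, lowercased words once, then traverse the DICTIONARY,
--     # adding count * int(score) for each key that actually occurs in the tweet.
--     allowed = set(ALPHABET + ' ')
--     freq = {}
--     for word in tLine.split():
--         w = ''.join(c for c in word if c in allowed).lower()
--         freq[w] = freq.get(w, 0) + 1
--     total = 0
--     for k, v in keyDictionary.items():
--         c = freq.get(k, 0)
--         if c:
--             total += c * int(v)
--     return total
-- ===== Notes on version B (the rewrite author's own statement) =====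
-- stated objective: alternative
-- what changed: B tallies the cleaned lowercased words into a frequency map in one pass and then traverses the sentiment dictionary, adding count * int(score) per dictionary key that occurs, instead of looking up every tweet word in order as A does.
import Mathlib
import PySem

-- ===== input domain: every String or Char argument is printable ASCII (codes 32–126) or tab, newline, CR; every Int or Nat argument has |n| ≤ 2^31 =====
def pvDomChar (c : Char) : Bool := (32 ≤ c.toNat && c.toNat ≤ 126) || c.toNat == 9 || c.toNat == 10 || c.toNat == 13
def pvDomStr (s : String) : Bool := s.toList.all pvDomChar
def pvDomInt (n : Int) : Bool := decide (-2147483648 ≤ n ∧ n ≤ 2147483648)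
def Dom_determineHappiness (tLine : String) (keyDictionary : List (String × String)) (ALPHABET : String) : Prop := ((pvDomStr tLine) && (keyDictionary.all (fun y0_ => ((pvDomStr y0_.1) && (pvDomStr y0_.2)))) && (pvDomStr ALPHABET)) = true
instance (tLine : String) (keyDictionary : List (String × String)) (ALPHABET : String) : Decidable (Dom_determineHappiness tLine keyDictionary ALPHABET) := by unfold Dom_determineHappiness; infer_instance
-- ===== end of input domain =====

-- B tallies the cleaned lowercased words into a frequency map once and then traverses the
-- dictionary, adding count * int(score) per occurring key, instead of looking up every tweet
-- word in order (objective: alternative).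


-- ===== PORT A =====
def determineHappiness (tLine : String) (keyDictionary : List (String × String)) (ALPHABET : String) : Int :=
  let allowed := PySem.Set.ofList (ALPHABET.toList ++ [' '])
  let tweetList := PySem.Str.split₀ tLine
  tweetList.foldl (fun sentiment key =>
    let key1 := String.ofList (key.toList.filter (fun l => PySem.Set.contains allowed l))
    let key2 := PySem.Str.lower key1
    match PySem.Dict.get? (PySem.Dict.mk keyDictionary) key2 with
    | some v =>
      match PySem.Int.ofStr? v with
      | some n => sentiment + n
      | none => sentiment   -- Python raises ValueError here; excluded by Pre_
    | none => sentiment) 0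

-- ===== PORT B =====
def determineHappiness_alt (tLine : String) (keyDictionary : List (String × String)) (ALPHABET : String) : Int :=
  let allowed := PySem.Set.ofList (ALPHABET.toList ++ [' '])
  let freq := ((PySem.Str.split₀ tLine).map (fun word =>
      PySem.Str.lower (String.ofList (word.toList.filter (fun c => PySem.Set.contains allowed c))))).foldl
      (fun d w => d.insert w (d.getD w 0 + 1)) PySem.Dict.empty
  keyDictionary.foldl (fun total kv =>
    let c : Int := freq.getD kv.1 0
    if c ≠ 0 then
      match PySem.Int.ofStr? kv.2 with
      | some n => total + c * n
      | none => total   -- Python raises ValueError here; excluded by Pre_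
    else total) 0

-- ===== PRECONDITION & SPEC =====

-- cleaning of one tweet word: keep allowed characters, lowercase (used by Pre_ and the proofs)
def pvClean (ALPHABET w : String) : String :=
  PySem.Str.lower (String.ofList (w.toList.filter (fun c =>
    PySem.Set.contains (PySem.Set.ofList (ALPHABET.toList ++ [' '])) c)))

-- Pre_ excludes (1) inputs on which Python A raises ValueError — some cleaned lowercased word of
-- tLine is a dictionary key whose value does not parse as an int — and (2) association lists with
-- duplicate keys, which correspond to no Python input (keyDictionary is a Python dict).
def Pre_determineHappiness (tLine : String) (keyDictionary : List (String × String)) (ALPHABET : String) : Prop :=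
  (keyDictionary.map Prod.fst).Nodup ∧
  ((PySem.Str.split₀ tLine).all (fun word =>
    match PySem.Dict.get? (PySem.Dict.mk keyDictionary) (pvClean ALPHABET word) with
    | some v => (PySem.Int.ofStr? v).isSome
    | none => true)) = true
instance (tLine : String) (keyDictionary : List (String × String)) (ALPHABET : String) : Decidable (Pre_determineHappiness tLine keyDictionary ALPHABET) := by unfold Pre_determineHappiness; infer_instance

def pvWitness_determineHappiness : String × (List (String × String)) × String :=
  ("Good day, good VIBES", [("good", "3"), ("day", "-1")], "abcdefghijklmnopqrstuvwxyz")

def Spec_determineHappiness (tLine : String) (keyDictionary : List (String × String)) (ALPHABET : String) (out : Int) : Prop := out = determineHappiness_alt tLine keyDictionary ALPHABET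
instance (tLine : String) (keyDictionary : List (String × String)) (ALPHABET : String) (out : Int) : Decidable (Spec_determineHappiness tLine keyDictionary ALPHABET out) := by unfold Spec_determineHappiness; infer_instance

-- ===== CLAIM (what is proved, stated in full; the proofs are below) =====
def Claim_equal_determineHappiness : Prop := ∀ (tLine : String) (keyDictionary : List (String × String)) (ALPHABET : String), Dom_determineHappiness tLine keyDictionary ALPHABET → Pre_determineHappiness tLine keyDictionary ALPHABET → Spec_determineHappiness tLine keyDictionary ALPHABET (determineHappiness tLine keyDictionary ALPHABET)

-- ===== LEMMAS AND PROOFS =====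

-- int value of one dictionary entry's score string, 0 if unparsable
def pvParse (v : String) : Int := (PySem.Int.ofStr? v).getD 0

-- score contributed by one cleaned word: value of its first dictionary match, 0 if unmatched
def pvG (l : List (String × String)) (k : String) : Int :=
  match PySem.Dict.get? (PySem.Dict.mk l) k with
  | some v => pvParse v
  | none => 0

lemma pv_witness_ok : Dom_determineHappiness pvWitness_determineHappiness.1 pvWitness_determineHappiness.2.1 pvWitness_determineHappiness.2.2 ∧ Pre_determineHappiness pvWitness_determineHappiness.1 pvWitness_determineHappiness.2.1 pvWitness_determineHappiness.2.2 := by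
  constructor <;> decide

-- A is the sum, over the cleaned words in order, of each word's dictionary score
lemma pv_A_eq (tLine : String) (keyDictionary : List (String × String)) (ALPHABET : String) :
    determineHappiness tLine keyDictionary ALPHABET
      = (((PySem.Str.split₀ tLine).map (pvClean ALPHABET)).map (pvG keyDictionary)).sum := by
  simp only [determineHappiness]
  rw [PySem.List.foldl_congr_mem _ _ (fun s key => s + pvG keyDictionary (pvClean ALPHABET key)) _ ?_,
      PySem.List.foldl_add, List.map_map]
  · simp only [zero_add, Function.comp_def]
  · intro s key _
    simp only [pvG, pvClean, pvParse]
    cases hg : PySem.Dict.get? (PySem.Dict.mk keyDictionary)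
        (PySem.Str.lower (String.ofList (key.toList.filter _))) with
    | none => simp
    | some v => cases h2 : PySem.Int.ofStr? v <;> simp [h2]

-- B (under Pre_) is the sum, over the dictionary entries, of count * score
lemma pv_B_eq (tLine : String) (keyDictionary : List (String × String)) (ALPHABET : String)
    (hPre : Pre_determineHappiness tLine keyDictionary ALPHABET) :
    determineHappiness_alt tLine keyDictionary ALPHABET
      = (keyDictionary.map (fun kv =>
          ((((PySem.Str.split₀ tLine).map (pvClean ALPHABET)).count kv.1 : Int) * pvParse kv.2))).sum := by
  obtain ⟨hnd, hall⟩ := hPre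
  simp only [determineHappiness_alt]
  rw [PySem.List.foldl_congr_mem _ _ (fun total kv =>
        total + (((PySem.Str.split₀ tLine).map (pvClean ALPHABET)).count kv.1 : Int) * pvParse kv.2) _ ?_,
      PySem.List.foldl_add]
  · simp only [zero_add]
  · intro total kv hkv
    obtain ⟨k, v⟩ := kv
    have hkeys : (PySem.Dict.mk keyDictionary).keys.Nodup := by simpa using hnd
    have hc : (((PySem.Str.split₀ tLine).map (fun word =>
        PySem.Str.lower (String.ofList (word.toList.filter (fun c =>
          PySem.Set.contains (PySem.Set.ofList (ALPHABET.toList ++ [' '])) c))))).foldl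
        (fun d w => d.insert w (d.getD w 0 + 1)) PySem.Dict.empty).getD k 0
        = (((PySem.Str.split₀ tLine).map (pvClean ALPHABET)).count k : Int) := by
      rw [PySem.Dict.getD_foldl_insert_add_one]
      simp only [PySem.Dict.getD_empty, zero_add]
      rfl
    simp only []
    rw [hc]
    by_cases h0 : (((PySem.Str.split₀ tLine).map (pvClean ALPHABET)).count k : Int) = 0
    · simp [h0]
    · -- the key occurs among the cleaned words, so Pre_ guarantees its value parses
      have hcnt : ((PySem.Str.split₀ tLine).map (pvClean ALPHABET)).count k ≠ 0 := by
        exact_mod_cast h0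
      have hmem : k ∈ (PySem.Str.split₀ tLine).map (pvClean ALPHABET) :=
        List.count_pos_iff.mp (Nat.pos_of_ne_zero hcnt)
      obtain ⟨word, hw, hwc⟩ := List.mem_map.mp hmem
      have hget : PySem.Dict.get? (PySem.Dict.mk keyDictionary) k = some v :=
        PySem.Dict.get?_of_mem_items (PySem.Dict.mk keyDictionary) hkv hkeys
      have hpar := List.all_eq_true.mp hall word hw
      rw [hwc, hget] at hpar
      obtain ⟨n, hn⟩ := Option.isSome_iff_exists.mp (by simpa using hpar)
      rw [if_pos h0, hn]
      simp [pvParse, hn]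

-- splitting an if-on-one-key sum out of a pointwise sum: if g vanishes at k, the sum of
-- 'C at k, g elsewhere' is count k * C plus the sum of g
lemma pv_split (cs : List String) (k : String) (C : Int) (g : String → Int) (hg : g k = 0) :
    (cs.map (fun w => if k == w then C else g w)).sum
      = (cs.count k : Int) * C + (cs.map g).sum := by
  induction cs with
  | nil => simp
  | cons x t ih =>
    by_cases hx : k = x
    · subst hx
      simp only [List.map_cons, List.sum_cons, BEq.rfl, ih, hg,
        List.count_cons_self]
      push_cast; ring
    · have hb : (k == x) = false := by simpa using hx
      rw [List.map_cons, List.sum_cons, hb, List.map_cons, List.sum_cons, ih,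
          List.count_cons_of_ne (fun h => hx h.symm)]
      simp only [Bool.false_eq_true, if_false]
      ring

-- exchanging the two sums: the word-major sum of first-match scores equals the
-- dictionary-major sum of count * score, when the dictionary keys are distinct
lemma pv_swap (cs : List String) (l : List (String × String))
    (hnd : (l.map Prod.fst).Nodup) :
    (cs.map (pvG l)).sum
      = (l.map (fun kv => ((cs.count kv.1 : Int) * pvParse kv.2))).sum := by
  induction l with
  | nil =>
    have : ∀ w ∈ cs, pvG [] w = 0 := by intro w _; simp [pvG, PySem.Dict.get?]
    simp [List.map_congr_left (fun w hw => this w hw)]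
  | cons kv t ih =>
    obtain ⟨hk, hnd'⟩ := List.nodup_cons.mp hnd
    have hg0 : pvG t kv.1 = 0 := by
      have : PySem.Dict.get? (PySem.Dict.mk t) kv.1 = none := by
        rw [PySem.Dict.get?_eq_none_iff_not_mem_keys]
        simpa using hk
      simp [pvG, this]
    have hstep : ∀ w ∈ cs, pvG (kv :: t) w
        = if kv.1 == w then pvParse kv.2 else pvG t w := by
      intro w _
      simp only [pvG]
      rw [show (kv : String × String) = (kv.1, kv.2) from rfl, PySem.Dict.get?_mk_cons]
      by_cases h : kv.1 = w
      · simp [h]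
      · simp [h]
    rw [List.map_congr_left hstep, pv_split cs kv.1 (pvParse kv.2) (pvG t) hg0,
        ih hnd', List.map_cons, List.sum_cons]

-- ===== VERDICT (by name: the statement is the Claim_ definition above) =====
theorem determineHappiness_spec : Claim_equal_determineHappiness := by
  intro tLine keyDictionary ALPHABET _hDom hPre
  unfold Spec_determineHappiness
  rw [pv_A_eq, pv_B_eq tLine keyDictionary ALPHABET hPre]
  exact pv_swap _ _ hPre.1
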